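-- pv_equiv track=rewrite | github.com/Tanu-N-Prabhu/Python | Hackerrank-Problem-Solving-Python-Solutions/HackerRank-Coloured Zenga/coloured_zenga.py | remove_colors
-- ===== SOURCE A (Python) =====
-- def remove_colors(colors):
--     """
--     Removes "white" elements from a list of colors and returns the count of remaining elements ("reds").
--
--     Args:
--         colors (list): A list of color strings.
--
--     Returns:
--         int: The number of remaining colors after removing "white".
--     """
--
--     # Initialize a write index to keep track of non-white elements
--     write_index = 0
--
--     # Iterate through the colors list
--     for i in range(len(colors)):
--         color = colors[i]
--
--         # If the color is not "white", copy it to the current write index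
--         if color != "white":
--             colors[write_index] = color
--             write_index += 1
--
--     # Truncate the list to remove remaining elements (efficient for large lists)
--     colors = colors[:write_index]
--
--     # Return the count of remaining colors (reds)
--     return write_index
-- ===== SOURCE B (Python) =====
-- def remove_colors(colors):
--     """Count non-white colors arithmetically: total length minus the number of "white" entries.
--     Unlike A, this does not mutate the caller's list (return-value equivalence only)."""
--     return len(colors) - colors.count("white")
-- ===== Notes on version B (the rewrite author's own statement) =====
-- stated objective: simpler
-- what changed: Replaces A's in-place compaction loop with a write index by pure arithmetic: count the 'white' occurrences with the builtin and subtract from the length, with no writes and no per-element Python loop; side effect (A's in-place compaction) is dropped, return-value equivalence only.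
import Mathlib
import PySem

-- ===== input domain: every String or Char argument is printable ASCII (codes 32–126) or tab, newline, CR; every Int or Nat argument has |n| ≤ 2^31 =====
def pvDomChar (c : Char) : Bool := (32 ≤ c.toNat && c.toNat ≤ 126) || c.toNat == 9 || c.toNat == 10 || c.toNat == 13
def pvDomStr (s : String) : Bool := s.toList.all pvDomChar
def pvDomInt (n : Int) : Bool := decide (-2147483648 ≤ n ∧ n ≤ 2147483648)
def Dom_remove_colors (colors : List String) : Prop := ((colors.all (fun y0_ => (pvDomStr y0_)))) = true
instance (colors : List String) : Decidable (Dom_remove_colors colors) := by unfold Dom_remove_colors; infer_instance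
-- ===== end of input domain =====

-- B counts the "white" entries and subtracts from the length (objective: simpler); A mutates the
-- argument list in Python and B does not — the equivalence proved here is about the RETURN value only.

-- ===== PORT A =====
-- A's loop: reads colors[i] from the (mutated) list, writes it at write_index when ≠ "white".
def remove_colors_loopA (cs : List String) (i wi : Nat) : Int :=
  if h : i < cs.length then
    let color := cs[i]
    if color ≠ "white" then remove_colors_loopA (cs.set wi color) (i+1) (wi+1)
    else remove_colors_loopA cs (i+1) wi
  else (wi : Int)
termination_by cs.length - i
decreasing_by
  · rw [List.length_set]; omega
  · omega

def remove_colors (colors : List String) : Int := remove_colors_loopA colors 0 0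

-- ===== PORT B =====
def remove_colors_alt (colors : List String) : Int :=
  (colors.length : Int) - (PySem.List.count colors "white" : Int)

-- ===== PRECONDITION & SPEC =====
def Spec_remove_colors (colors : List String) (out : Int) : Prop := out = remove_colors_alt colors
instance (colors : List String) (out : Int) : Decidable (Spec_remove_colors colors out) := by unfold Spec_remove_colors; infer_instance

-- ===== CLAIM (what is proved, stated in full; the proofs are below) =====
def Claim_equal_remove_colors : Prop := ∀ (colors : List String), Dom_remove_colors colors → Spec_remove_colors colors (remove_colors colors)

-- ===== LEMMAS AND PROOFS =====

-- The loop's result is wi plus the non-"white" count of the unread suffix: the write at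
-- wi ≤ i never touches indices > i, so the suffix cs.drop (i+1) is unaffected.
theorem remove_colors_loopA_eq (n : Nat) :
    ∀ (cs : List String) (i wi : Nat), cs.length - i = n → wi ≤ i →
    remove_colors_loopA cs i wi =
      ((wi + (cs.drop i).countP (fun c => c != "white") : Nat) : Int) := by
  induction n with
  | zero =>
    intro cs i wi hn _
    rw [remove_colors_loopA]
    have hi : ¬ i < cs.length := by omega
    have hd : cs.drop i = [] := List.drop_eq_nil_of_le (by omega)
    simp [hi, hd]
  | succ n ih =>
    intro cs i wi hn hwi
    rw [remove_colors_loopA]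
    have hi : i < cs.length := by omega
    have hdrop : cs.drop i = cs[i] :: cs.drop (i+1) := List.drop_eq_getElem_cons hi
    simp only [hi, dif_pos]
    by_cases hc : cs[i] ≠ "white"
    · rw [if_pos hc]
      have hlen : (cs.set wi cs[i]).length - (i+1) = n := by
        rw [List.length_set]; omega
      rw [ih _ _ _ hlen (by omega)]
      have hds : (cs.set wi cs[i]).drop (i+1) = cs.drop (i+1) := by
        rw [List.drop_set]
        simp only [if_pos (by omega : wi < i + 1)]
      rw [hds, hdrop]
      have hb : (cs[i] != "white") = true := by simpa using hc
      simp only [List.countP_cons, hb, if_true]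
      push_cast
      omega
    · rw [if_neg hc]
      have hc' : cs[i] = "white" := not_not.mp hc
      rw [ih cs (i+1) wi (by omega) (by omega), hdrop]
      have hb : (cs[i] != "white") = false := by simp [hc']
      simp only [List.countP_cons, hb]
      push_cast
      omega

-- countP (≠ "white") = length - count "white"
theorem countP_ne_eq_sub (colors : List String) :
    (colors.countP (fun c => c != "white") : Int) =
      (colors.length : Int) - (PySem.List.count colors "white" : Int) := by
  induction colors with
  | nil => simp [PySem.List.count]
  | cons c cs ih =>
    by_cases hc : c = "white" <;>
      simp [List.countP_cons, PySem.List.count, List.count_cons, hc] at ih ⊢ <;>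
      push_cast <;> omega

theorem remove_colors_spec' (colors : List String) :
    remove_colors colors = remove_colors_alt colors := by
  unfold remove_colors remove_colors_alt
  rw [remove_colors_loopA_eq (colors.length) colors 0 0 (by omega) (by omega)]
  simp only [List.drop_zero]
  push_cast
  rw [countP_ne_eq_sub]
  ring

-- ===== VERDICT (by name: the statement is the Claim_ definition above) =====
theorem remove_colors_spec : Claim_equal_remove_colors := by
  intro colors _
  unfold Spec_remove_colors
  exact remove_colors_spec' colors
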